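-- pv_equiv track=rewrite | github.com/rraadd88/data2ml | data2ml/lib/io_ml.py | get_cols_del
-- ===== SOURCE A (Python) =====
-- def get_cols_del(data_feats):
--     cols_del=[col for col in data_feats if "Helix formation" in col]+\
--     [col for col in data_feats if "beta bridge" in col]+\
--     [col for col in data_feats if "Chirality" in col]+\
--     [col for col in data_feats if "Offset from residue to the partner" in col]+\
--     [col for col in data_feats if "Energy (kcal/mol) of " in col]+\
--     [col for col in data_feats if "Secondary structure" in col]+\
--     [col for col in data_feats if 'cosine of the angle between C=O of residue and C=O of previous residue' in col]+\
--     [col for col in data_feats if '$\Delta$(Molecular Polarizability) per substitution' in col]+\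
--     [col for col in data_feats if '$\Delta$(Molecular weight (Da)) per substitution' in col]+\
--     [col for col in data_feats if '$\Delta$(Molecular Refractivity) per substitution' in col]+\
--     [col for col in data_feats if 'bend' in col]
--     return cols_del
-- ===== SOURCE B (Python) =====
-- PATTERNS = [
--     "Helix formation",
--     "beta bridge",
--     "Chirality",
--     "Offset from residue to the partner",
--     "Energy (kcal/mol) of ",
--     "Secondary structure",
--     'cosine of the angle between C=O of residue and C=O of previous residue',
--     '$\Delta$(Molecular Polarizability) per substitution',
--     '$\Delta$(Molecular weight (Da)) per substitution',
--     '$\Delta$(Molecular Refractivity) per substitution',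
--     'bend',
-- ]
--
-- def get_cols_del(data_feats):
--     buckets = [[] for _ in PATTERNS]
--     for col in data_feats:
--         for i, p in enumerate(PATTERNS):
--             if p in col:
--                 buckets[i].append(col)
--     out = []
--     for b in buckets:
--         out.extend(b)
--     return out
-- ===== Notes on version B (the rewrite author's own statement) =====
-- stated objective: alternative
-- what changed: Eleven separate full scans of data_feats (one list comprehension per pattern) become a single pass that appends each column to per-pattern buckets, concatenated at the end.
import Mathlib
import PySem

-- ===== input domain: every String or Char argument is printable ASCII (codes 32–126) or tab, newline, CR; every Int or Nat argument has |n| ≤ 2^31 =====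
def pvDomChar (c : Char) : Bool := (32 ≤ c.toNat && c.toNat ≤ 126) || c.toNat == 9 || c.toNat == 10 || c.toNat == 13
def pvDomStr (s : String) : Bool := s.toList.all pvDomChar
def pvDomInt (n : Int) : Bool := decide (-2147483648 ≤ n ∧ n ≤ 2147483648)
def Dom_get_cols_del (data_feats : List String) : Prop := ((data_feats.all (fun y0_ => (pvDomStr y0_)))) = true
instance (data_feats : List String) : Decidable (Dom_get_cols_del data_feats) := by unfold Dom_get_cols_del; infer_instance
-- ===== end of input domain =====

-- ===== PORT A =====
-- B replaces A's eleven list-comprehension scans by one pass filling per-pattern buckets (same return value).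
def get_cols_del (data_feats : List String) : List String :=
  (data_feats.filter (fun col => PySem.Str.isIn "Helix formation" col)) ++
  (data_feats.filter (fun col => PySem.Str.isIn "beta bridge" col)) ++
  (data_feats.filter (fun col => PySem.Str.isIn "Chirality" col)) ++
  (data_feats.filter (fun col => PySem.Str.isIn "Offset from residue to the partner" col)) ++
  (data_feats.filter (fun col => PySem.Str.isIn "Energy (kcal/mol) of " col)) ++
  (data_feats.filter (fun col => PySem.Str.isIn "Secondary structure" col)) ++
  (data_feats.filter (fun col => PySem.Str.isIn "cosine of the angle between C=O of residue and C=O of previous residue" col)) ++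
  (data_feats.filter (fun col => PySem.Str.isIn "$\\Delta$(Molecular Polarizability) per substitution" col)) ++
  (data_feats.filter (fun col => PySem.Str.isIn "$\\Delta$(Molecular weight (Da)) per substitution" col)) ++
  (data_feats.filter (fun col => PySem.Str.isIn "$\\Delta$(Molecular Refractivity) per substitution" col)) ++
  (data_feats.filter (fun col => PySem.Str.isIn "bend" col))

-- ===== PORT B =====
def pvPatterns : List String :=
  ["Helix formation", "beta bridge", "Chirality",
   "Offset from residue to the partner", "Energy (kcal/mol) of ",
   "Secondary structure",
   "cosine of the angle between C=O of residue and C=O of previous residue",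
   "$\\Delta$(Molecular Polarizability) per substitution",
   "$\\Delta$(Molecular weight (Da)) per substitution",
   "$\\Delta$(Molecular Refractivity) per substitution",
   "bend"]

-- one step of B's inner loop: append col to every bucket whose pattern occurs in col
def pvStep (buckets : List (List String)) (col : String) : List (List String) :=
  List.zipWith (fun p b => if PySem.Str.isIn p col then b ++ [col] else b) pvPatterns buckets

def get_cols_del_alt (data_feats : List String) : List String :=
  (data_feats.foldl pvStep (pvPatterns.map (fun _ => []))).flatten

-- ===== PRECONDITION & SPEC =====
def Spec_get_cols_del (data_feats : List String) (out : List String) : Prop := out = get_cols_del_alt data_feats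
instance (data_feats : List String) (out : List String) : Decidable (Spec_get_cols_del data_feats out) := by unfold Spec_get_cols_del; infer_instance

-- ===== CLAIM (what is proved, stated in full; the proofs are below) =====
def Claim_equal_get_cols_del : Prop := ∀ (data_feats : List String), Dom_get_cols_del data_feats → Spec_get_cols_del data_feats (get_cols_del data_feats)

-- ===== LEMMAS AND PROOFS =====
theorem pvZipWith_map_right {a b g : Type} (f : a -> b) (h : a -> b -> g) (ps : List a) :
    List.zipWith h ps (ps.map f) = ps.map (fun p => h p (f p)) := by
  induction ps with
  | nil => rfl
  | cons p ps ih => simp [ih]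

theorem pvFoldl_step (xs : List String) (f : String -> List String) :
    xs.foldl pvStep (pvPatterns.map f)
      = pvPatterns.map (fun p => f p ++ xs.filter (fun c => PySem.Str.isIn p c)) := by
  induction xs generalizing f with
  | nil => simp
  | cons c xs ih =>
    have h1 : pvStep (pvPatterns.map f) c
        = pvPatterns.map (fun p => f p ++ (if PySem.Str.isIn p c then [c] else [])) := by
      unfold pvStep
      rw [pvZipWith_map_right]
      apply List.map_congr_left
      intro p _
      by_cases h : PySem.Chars.isIn p.toList c.toList <;> simp [h]
    simp only [List.foldl_cons, h1, ih]
    apply List.map_congr_left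
    intro p _
    by_cases h : PySem.Chars.isIn p.toList c.toList <;> simp [h, List.append_assoc]

-- ===== VERDICT (by name: the statement is the Claim_ definition above) =====
theorem get_cols_del_spec : Claim_equal_get_cols_del := by
  intro data_feats _
  unfold Spec_get_cols_del get_cols_del get_cols_del_alt
  rw [pvFoldl_step]
  simp [pvPatterns]
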